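-- pv_equiv track=rewrite | github.com/Azat-1997/Title-repository | Python/gamelife.py | get_moore
-- ===== SOURCE A (Python) =====
-- def get_moore(cell, n, m, rank=1):
--   # get the neigbores in Moore's neigborehood
--   res = {}
--   for i in range(-rank, rank+1):
--     for j in range(-rank, rank+1):
--       if i != 0 or j != 0:
--         neigbore = ((cell[0]+i)%n, (cell[1]+j)%m)
--         if neigbore not in res.keys():
--           res[neigbore] = 1
--         else:
--           res[neigbore] += 1
--   return res
-- ===== SOURCE B (Python) =====
-- def get_moore(cell, n, m, rank=1):
--   # product of two 1-D neighbourhood counters instead of the 2-D offset enumeration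
--   if rank <= 0:
--     return {}
--   countX = {}
--   for i in range(-rank, rank+1):
--     x = (cell[0] + i) % n
--     countX[x] = countX.get(x, 0) + 1
--   countY = {}
--   for j in range(-rank, rank+1):
--     y = (cell[1] + j) % m
--     countY[y] = countY.get(y, 0) + 1
--   res = {}
--   for x, cx in countX.items():
--     for y, cy in countY.items():
--       res[(x, y)] = cx * cy
--   center = (cell[0] % n, cell[1] % m)
--   res[center] -= 1
--   if res[center] == 0:
--     del res[center]
--   return res
-- ===== Notes on version B (the rewrite author's own statement) =====
-- stated objective: alternative
-- what changed: Replaces the (2*rank+1)^2 two-dimensional offset enumeration with two one-dimensional modular counters over i and j whose product dict gives every neighbour count at once, followed by a single decrement (and possible deletion) of the centre cell to account for the excluded (0,0) offset.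
import Mathlib
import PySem

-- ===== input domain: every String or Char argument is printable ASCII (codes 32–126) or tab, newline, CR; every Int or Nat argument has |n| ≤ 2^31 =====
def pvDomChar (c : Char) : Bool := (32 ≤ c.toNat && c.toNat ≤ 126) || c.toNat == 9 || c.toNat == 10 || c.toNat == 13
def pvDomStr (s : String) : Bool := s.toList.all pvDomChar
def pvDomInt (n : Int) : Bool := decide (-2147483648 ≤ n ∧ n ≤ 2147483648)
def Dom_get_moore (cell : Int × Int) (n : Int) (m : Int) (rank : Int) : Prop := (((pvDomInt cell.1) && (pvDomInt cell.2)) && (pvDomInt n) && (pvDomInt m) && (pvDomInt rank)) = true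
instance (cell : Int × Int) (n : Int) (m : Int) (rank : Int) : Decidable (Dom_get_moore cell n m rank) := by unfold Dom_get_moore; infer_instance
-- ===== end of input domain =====

-- B replaces A's 2-D offset enumeration by the product of two 1-D modular counters plus one
-- centre-cell decrement; same dict (as ordered association list) on every admitted input.

-- ===== PORT A =====
def get_moore (cell : Int × Int) (n : Int) (m : Int) (rank : Int) : List (Int × Int × Int) :=
  let res : PySem.Dict (Int × Int) Int :=
    (PySem.List.pyRange (-rank) (rank+1) 1).foldl (fun res i =>
      (PySem.List.pyRange (-rank) (rank+1) 1).foldl (fun res j =>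
        if i ≠ 0 ∨ j ≠ 0 then
          let nb := (PySem.Int.mod (cell.1 + i) n, PySem.Int.mod (cell.2 + j) m)
          if !res.contains nb then res.insert nb 1
          else res.insert nb (res.getD nb 0 + 1)
        else res) res) PySem.Dict.empty
  res.items.map (fun p => (p.1.1, p.1.2, p.2))

-- ===== PORT B =====
def get_moore_alt (cell : Int × Int) (n : Int) (m : Int) (rank : Int) : List (Int × Int × Int) :=
  if rank ≤ 0 then []
  else
    let cX : PySem.Dict Int Int :=
      (PySem.List.pyRange (-rank) (rank+1) 1).foldl (fun d i =>
        d.insert (PySem.Int.mod (cell.1 + i) n) (d.getD (PySem.Int.mod (cell.1 + i) n) 0 + 1))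
        PySem.Dict.empty
    let cY : PySem.Dict Int Int :=
      (PySem.List.pyRange (-rank) (rank+1) 1).foldl (fun d j =>
        d.insert (PySem.Int.mod (cell.2 + j) m) (d.getD (PySem.Int.mod (cell.2 + j) m) 0 + 1))
        PySem.Dict.empty
    let res : PySem.Dict (Int × Int) Int :=
      cX.items.foldl (fun r p =>
        cY.items.foldl (fun r q => r.insert (p.1, q.1) (p.2 * q.2)) r) PySem.Dict.empty
    let c := (PySem.Int.mod cell.1 n, PySem.Int.mod cell.2 m)
    let res := res.insert c (res.getD c 0 - 1)
    let res := if res.getD c 0 = 0 then res.erase c else res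
    res.items.map (fun p => (p.1.1, p.1.2, p.2))

-- ===== PRECONDITION & SPEC =====
-- Pre_ excludes exactly the inputs on which A raises ZeroDivisionError: a positive rank with
-- a zero modulus (for rank ≤ 0 no modulo is ever evaluated by A and it returns {}).
def Pre_get_moore (cell : Int × Int) (n : Int) (m : Int) (rank : Int) : Prop :=
  rank ≤ 0 ∨ (n ≠ 0 ∧ m ≠ 0)
instance (cell : Int × Int) (n : Int) (m : Int) (rank : Int) : Decidable (Pre_get_moore cell n m rank) := by unfold Pre_get_moore; infer_instance

def pvWitness_get_moore : (Int × Int) × Int × Int × Int := ((1, 2), 2, 3, 2)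

def Spec_get_moore (cell : Int × Int) (n : Int) (m : Int) (rank : Int) (out : List (Int × Int × Int)) : Prop := out = get_moore_alt cell n m rank
instance (cell : Int × Int) (n : Int) (m : Int) (rank : Int) (out : List (Int × Int × Int)) : Decidable (Spec_get_moore cell n m rank out) := by unfold Spec_get_moore; infer_instance

-- ===== CLAIM (what is proved, stated in full; the proofs are below) =====
def Claim_equal_get_moore : Prop := ∀ (cell : Int × Int) (n : Int) (m : Int) (rank : Int), Dom_get_moore cell n m rank → Pre_get_moore cell n m rank → Spec_get_moore cell n m rank (get_moore cell n m rank)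

-- ===== LEMMAS AND PROOFS =====

theorem pv_mod_sub_dvd (a n : Int) : n ∣ (a - PySem.Int.mod a n) := by
  have h := PySem.Int.floordiv_mul_add_mod a n
  exact ⟨PySem.Int.floordiv a n, by linarith⟩

theorem pv_mod_eq_iff {n : Int} (hn : n ≠ 0) (a b : Int) :
    PySem.Int.mod a n = PySem.Int.mod b n ↔ n ∣ (a - b) := by
  have h1 := pv_mod_sub_dvd a n
  have h2 := pv_mod_sub_dvd b n
  constructor
  · intro h
    have := Int.dvd_sub h1 h2
    rw [h] at this
    simpa using this
  · intro h
    have hd : n ∣ (PySem.Int.mod a n - PySem.Int.mod b n) := by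
      have h3 := Int.dvd_add (Int.dvd_sub h h1) h2
      have h4 : a - b - (a - PySem.Int.mod a n) + (b - PySem.Int.mod b n)
          = PySem.Int.mod a n - PySem.Int.mod b n := by ring
      rwa [h4] at h3
    rcases lt_or_gt_of_ne hn with hneg | hpos
    · have ba := PySem.Int.mod_neg_bounds a hneg
      have bb := PySem.Int.mod_neg_bounds b hneg
      have hd' : (-n) ∣ (PySem.Int.mod a n - PySem.Int.mod b n) := (Int.neg_dvd).mpr hd
      have : PySem.Int.mod a n - PySem.Int.mod b n = 0 :=
        Int.eq_zero_of_abs_lt_dvd hd' (by rw [abs_lt]; omega)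
      omega
    · have ba1 := PySem.Int.mod_nonneg a hpos
      have ba2 := PySem.Int.mod_lt a hpos
      have bb1 := PySem.Int.mod_nonneg b hpos
      have bb2 := PySem.Int.mod_lt b hpos
      have : PySem.Int.mod a n - PySem.Int.mod b n = 0 :=
        Int.eq_zero_of_abs_lt_dvd hd (by rw [abs_lt]; omega)
      omega

-- filter commutes with product on the first component
theorem pv_filter_product (p : Int → Bool) (X Y : List Int) :
    (X.filter p) ×ˢ Y = (X ×ˢ Y).filter (fun q => p q.1) := by
  induction X with
  | nil => simp [List.nil_product]
  | cons x X ih =>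
    by_cases hx : p x
    · rw [List.filter_cons_of_pos hx, List.product_cons, List.product_cons, List.filter_append, ih]
      congr 1
      rw [List.filter_map]
      have : ((fun q : Int × Int => p q.1) ∘ (fun b => (x, b))) = fun _ => true := by
        funext b; simp [hx]
      rw [this, List.filter_true]
    · rw [List.filter_cons_of_neg hx, List.product_cons, List.filter_append, ih]
      have : (List.map (fun b => (x, b)) Y).filter (fun q : Int × Int => p q.1) = [] := by
        rw [List.filter_map]
        have : ((fun q : Int × Int => p q.1) ∘ (fun b => (x, b))) = fun _ => false := by
          funext b; simp [hx]
        rw [this, List.filter_false, List.map_nil]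
      rw [this, List.nil_append]

-- count in a product
theorem pv_count_product (X Y : List Int) (x y : Int) :
    (X ×ˢ Y).count (x, y) = X.count x * Y.count y := by
  induction X with
  | nil => simp [List.nil_product]
  | cons a X ih =>
    rw [List.product_cons, List.count_append, ih]
    by_cases ha : a = x
    · subst ha
      have : (List.map (fun b => (a, b)) Y).count (a, y) = Y.count y := by
        rw [List.count_eq_countP, List.countP_map, List.count_eq_countP]
        congr 1
        funext b; simp
      rw [this, List.count_cons_self]
      ring
    · have : (List.map (fun b => (a, b)) Y).count (x, y) = 0 := by
        rw [List.count_eq_countP, List.countP_map]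
        apply List.countP_eq_zero.mpr
        intro b _
        simp [ha]
      rw [this, List.count_cons_of_ne]
      · omega
      · simp [ha]

-- Set.ofList commutes with the injective map (Prod.mk x)
theorem pv_update_map_mk (x : Int) (Y : List Int) : ∀ (S : PySem.Set Int),
    PySem.Set.update (S.map (Prod.mk x)) (Y.map (Prod.mk x)) = (PySem.Set.update S Y).map (Prod.mk x) := by
  induction Y with
  | nil => intro S; simp [PySem.Set.update]
  | cons y Y ih =>
    intro S
    have hadd : PySem.Set.add (S.map (Prod.mk x)) (x, y) = (PySem.Set.add S y).map (Prod.mk x) := by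
      by_cases h : y ∈ S
      · simp [PySem.Set.add, List.contains_iff_mem, h]
      · simp [PySem.Set.add, List.contains_iff_mem, h]
    have h1 : PySem.Set.update (S.map (Prod.mk x)) ((y :: Y).map (Prod.mk x))
        = PySem.Set.update (PySem.Set.add (S.map (Prod.mk x)) (x, y)) (Y.map (Prod.mk x)) := rfl
    rw [h1, hadd, ih]
    rfl

theorem pv_ofList_map_mk (x : Int) (Y : List Int) :
    PySem.Set.ofList (Y.map (Prod.mk x)) = (PySem.Set.ofList Y).map (Prod.mk x) := by
  have := pv_update_map_mk x Y []
  simpa [PySem.Set.ofList_eq_foldl] using this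

theorem pv_ofList_single (x : Int) : PySem.Set.ofList [x] = [x] := by
  simp [PySem.Set.ofList, PySem.Set.add, PySem.Set.empty]

theorem pv_ofList_cons (x : Int) (X : List Int) :
    PySem.Set.ofList (x :: X) = x :: (PySem.Set.ofList X).filter (fun z => !(z == x)) := by
  have h0 : (x :: X) = [x] ++ X := rfl
  rw [h0, PySem.Set.ofList_append, pv_ofList_single, PySem.Set.update_eq_append_filter]
  simp only [PySem.Set.contains, List.cons_append, List.nil_append]
  congr 1
  apply List.filter_congr
  intro z _
  rw [Bool.eq_iff_iff]
  simp

theorem pv_ofList_product (X Y : List Int) :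
    PySem.Set.ofList (X ×ˢ Y) = (PySem.Set.ofList X) ×ˢ (PySem.Set.ofList Y) := by
  induction X with
  | nil => simp [List.nil_product, PySem.Set.ofList, PySem.Set.empty]
  | cons x X ih =>
    rw [List.product_cons, PySem.Set.ofList_append, PySem.Set.update_eq_append_filter,
        pv_ofList_map_mk, ih, pv_ofList_cons, List.product_cons, pv_filter_product]
    congr 1
    apply List.filter_congr
    intro p hp
    have hp2 : p.2 ∈ PySem.Set.ofList Y := (List.mem_product.mp hp).2
    have hp2' : p.2 ∈ Y := (PySem.Set.mem_ofList Y p.2).mp hp2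
    simp only [PySem.Set.contains, List.contains_iff_mem, List.mem_map]
    by_cases hx : p.1 = x
    · have h1 : ∃ a ∈ Y, (x, a) = p := ⟨p.2, hp2', by rw [← hx]⟩
      simp [h1, hx]
    · have h1 : ¬ ∃ a ∈ Y, (x, a) = p := by
        rintro ⟨a, _, rfl⟩; exact hx rfl
      simp [h1, hx]

theorem pv_update_cons (S : PySem.Set (Int × Int)) (c : Int × Int) (W : List (Int × Int)) :
    PySem.Set.update S (c :: W) = PySem.Set.update (PySem.Set.add S c) W := rfl

theorem pv_ofList_mid_mem (W1 W2 : List (Int × Int)) (c : Int × Int) (h : c ∈ W1) :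
    PySem.Set.ofList (W1 ++ W2) = PySem.Set.ofList (W1 ++ c :: W2) := by
  rw [PySem.Set.ofList_append, PySem.Set.ofList_append, pv_update_cons]
  have hmem : c ∈ PySem.Set.ofList W1 := (PySem.Set.mem_ofList W1 c).mpr h
  have : PySem.Set.add (PySem.Set.ofList W1) c = PySem.Set.ofList W1 := by
    simp [PySem.Set.add, PySem.Set.contains, List.contains_iff_mem, hmem]
  rw [this]

theorem pv_ofList_mid_not_mem (W1 W2 : List (Int × Int)) (c : Int × Int)
    (h1 : c ∉ W1) (h2 : c ∉ W2) :
    PySem.Set.ofList (W1 ++ W2) = (PySem.Set.ofList (W1 ++ c :: W2)).filter (fun k => !(k == c)) := by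
  rw [PySem.Set.ofList_append, PySem.Set.ofList_append, pv_update_cons]
  have hmem : c ∉ PySem.Set.ofList W1 := fun hc => h1 ((PySem.Set.mem_ofList W1 c).mp hc)
  have hadd : PySem.Set.add (PySem.Set.ofList W1) c = PySem.Set.ofList W1 ++ [c] := by
    simp [PySem.Set.add, PySem.Set.contains, List.contains_iff_mem, hmem]
  rw [hadd, PySem.Set.update_eq_append_filter, PySem.Set.update_eq_append_filter]
  rw [List.filter_append, List.filter_append]
  have hW1 : (PySem.Set.ofList W1).filter (fun k => !(k == c)) = PySem.Set.ofList W1 := by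
    apply List.filter_eq_self.mpr
    intro a ha
    have : a ≠ c := fun hac => hmem (hac ▸ ha)
    simp [this]
  have hc1 : ([c] : List (Int × Int)).filter (fun k => !(k == c)) = [] := by simp
  rw [hW1, hc1]
  have hfilt : ∀ (y : Int × Int), y ∈ PySem.Set.ofList W2 →
      (!(PySem.Set.ofList W1 ++ [c]).contains y) = (!(PySem.Set.ofList W1).contains y) := by
    intro y hy
    have hyW2 : y ∈ W2 := (PySem.Set.mem_ofList W2 y).mp hy
    have hyc : y ≠ c := fun h => h2 (h ▸ hyW2)
    simp [PySem.Set.contains, List.contains_iff_mem, hyc]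
  have heq : (PySem.Set.ofList W2).filter (fun y => !(PySem.Set.ofList W1 ++ [c] : PySem.Set (Int × Int)).contains y)
      = (PySem.Set.ofList W2).filter (fun y => !(PySem.Set.ofList W1).contains y) :=
    List.filter_congr hfilt
  rw [heq]
  have hlast : ((PySem.Set.ofList W2).filter (fun y => !(PySem.Set.ofList W1).contains y)).filter (fun k => !(k == c))
      = (PySem.Set.ofList W2).filter (fun y => !(PySem.Set.ofList W1).contains y) := by
    apply List.filter_eq_self.mpr
    intro a ha
    have haW2 : a ∈ W2 := (PySem.Set.mem_ofList W2 a).mp (List.mem_of_mem_filter ha)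
    have : a ≠ c := fun hac => h2 (hac ▸ haW2)
    simp [this]
  rw [hlast, List.append_nil]

def pvL (rank : Int) : List Int := PySem.List.pyRange (-rank) (rank+1) 1

def pvPA (cell : Int × Int) (n m rank : Int) : List (Int × Int) :=
  (pvL rank).flatMap (fun i =>
    ((pvL rank).filter (fun j => decide (i ≠ 0 ∨ j ≠ 0))).map
      (fun j => (PySem.Int.mod (cell.1 + i) n, PySem.Int.mod (cell.2 + j) m)))

theorem pv_A_norm (cell : Int × Int) (n m rank : Int) :
    get_moore cell n m rank =
      ((PySem.Set.ofList (pvPA cell n m rank)).map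
        (fun k => (k, ((pvPA cell n m rank).count k : Int)))).map (fun p => (p.1.1, p.1.2, p.2)) := by
  have hdict :
      (List.foldl (fun res i =>
        List.foldl (fun res j =>
          if i ≠ 0 ∨ j ≠ 0 then
            if !res.contains (PySem.Int.mod (cell.1 + i) n, PySem.Int.mod (cell.2 + j) m) then
              res.insert (PySem.Int.mod (cell.1 + i) n, PySem.Int.mod (cell.2 + j) m) 1
            else res.insert (PySem.Int.mod (cell.1 + i) n, PySem.Int.mod (cell.2 + j) m)
              (res.getD (PySem.Int.mod (cell.1 + i) n, PySem.Int.mod (cell.2 + j) m) 0 + 1)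
          else res) res (PySem.List.pyRange (-rank) (rank+1) 1))
        (PySem.Dict.empty : PySem.Dict (Int × Int) Int) (PySem.List.pyRange (-rank) (rank+1) 1))
      = PySem.Dict.counter (pvPA cell n m rank) := by
    rw [show PySem.List.pyRange (-rank) (rank+1) 1 = pvL rank from rfl]
    have hstep : ∀ (d : PySem.Dict (Int × Int) Int) (nb : Int × Int),
        (if !d.contains nb then d.insert nb 1 else d.insert nb (d.getD nb 0 + 1))
        = d.insert nb (d.getD nb 0 + 1) := by
      intro d nb
      by_cases h : d.contains nb
      · simp [h]
      · have h' : d.contains nb = false := by simpa using h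
        rw [PySem.Dict.getD_of_not_contains d 0 h']
        simp [h']
    have h1 : ∀ (acc : PySem.Dict (Int × Int) Int), ∀ i ∈ pvL rank,
        ((pvL rank).foldl (fun res j =>
          if i ≠ 0 ∨ j ≠ 0 then
            if !res.contains (PySem.Int.mod (cell.1 + i) n, PySem.Int.mod (cell.2 + j) m) then
              res.insert (PySem.Int.mod (cell.1 + i) n, PySem.Int.mod (cell.2 + j) m) 1
            else res.insert (PySem.Int.mod (cell.1 + i) n, PySem.Int.mod (cell.2 + j) m)
              (res.getD (PySem.Int.mod (cell.1 + i) n, PySem.Int.mod (cell.2 + j) m) 0 + 1)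
          else res) acc)
        = (((pvL rank).filter (fun j => decide (i ≠ 0 ∨ j ≠ 0))).map
            (fun j => (PySem.Int.mod (cell.1 + i) n, PySem.Int.mod (cell.2 + j) m))).foldl
            (fun d x => d.insert x (d.getD x 0 + 1)) acc := by
      intro acc i _
      have hcongr : ((pvL rank).foldl (fun res j =>
          if i ≠ 0 ∨ j ≠ 0 then
            let nb := (PySem.Int.mod (cell.1 + i) n, PySem.Int.mod (cell.2 + j) m)
            if !res.contains nb then res.insert nb 1
            else res.insert nb (res.getD nb 0 + 1)
          else res) acc)
          = ((pvL rank).foldl (fun res j =>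
          if i ≠ 0 ∨ j ≠ 0 then
            res.insert (PySem.Int.mod (cell.1 + i) n, PySem.Int.mod (cell.2 + j) m)
              (res.getD (PySem.Int.mod (cell.1 + i) n, PySem.Int.mod (cell.2 + j) m) 0 + 1)
          else res) acc) := by
        apply PySem.List.foldl_congr_mem
        intro a j _
        by_cases hij : i ≠ 0 ∨ j ≠ 0
        · simp only [if_pos hij]
          exact hstep a _
        · simp only [if_neg hij]
      rw [hcongr, PySem.List.foldl_ite_eq_foldl_filter, List.foldl_map]
    rw [PySem.List.foldl_congr_mem _ _ _ _ (fun acc i hi => h1 acc i hi)]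
    rw [pvPA, ← List.foldl_flatMap]
    exact PySem.Dict.foldl_insert_getD_add_one_eq_counter _
  show (List.foldl (fun res i =>
        List.foldl (fun res j =>
          if i ≠ 0 ∨ j ≠ 0 then
            if !res.contains (PySem.Int.mod (cell.1 + i) n, PySem.Int.mod (cell.2 + j) m) then
              res.insert (PySem.Int.mod (cell.1 + i) n, PySem.Int.mod (cell.2 + j) m) 1
            else res.insert (PySem.Int.mod (cell.1 + i) n, PySem.Int.mod (cell.2 + j) m)
              (res.getD (PySem.Int.mod (cell.1 + i) n, PySem.Int.mod (cell.2 + j) m) 0 + 1)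
          else res) res (PySem.List.pyRange (-rank) (rank+1) 1))
        (PySem.Dict.empty : PySem.Dict (Int × Int) Int) (PySem.List.pyRange (-rank) (rank+1) 1)).items.map
        (fun p => (p.1.1, p.1.2, p.2)) = _
  rw [hdict, PySem.Dict.items_counter]

def pvX (cell : Int × Int) (n rank : Int) : List Int :=
  (pvL rank).map (fun i => PySem.Int.mod (cell.1 + i) n)
def pvY (cell : Int × Int) (m rank : Int) : List Int :=
  (pvL rank).map (fun j => PySem.Int.mod (cell.2 + j) m)

theorem pv_map_product {α β γ δ : Type} (u : α → γ) (w : β → δ) (A : List α) (B : List β) :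
    (A ×ˢ B).map (fun pq => (u pq.1, w pq.2)) = (A.map u) ×ˢ (B.map w) := by
  induction A with
  | nil => simp [List.nil_product]
  | cons a A ih =>
    rw [List.product_cons, List.map_cons, List.product_cons, List.map_append, ih]
    congr 1
    simp [List.map_map, Function.comp]

theorem pv_B_cX (cell : Int × Int) (n rank : Int) :
    ((PySem.List.pyRange (-rank) (rank+1) 1).foldl (fun d i =>
      d.insert (PySem.Int.mod (cell.1 + i) n) (d.getD (PySem.Int.mod (cell.1 + i) n) 0 + 1))
      (PySem.Dict.empty : PySem.Dict Int Int))
    = PySem.Dict.counter (pvX cell n rank) := by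
  rw [pvX, pvL, ← PySem.Dict.foldl_insert_getD_add_one_eq_counter, List.foldl_map]

theorem pv_B_res (cell : Int × Int) (n m rank : Int) :
    ((PySem.Dict.counter (pvX cell n rank)).items.foldl (fun r p =>
      (PySem.Dict.counter (pvY cell m rank)).items.foldl
        (fun r q => r.insert (p.1, q.1) (p.2 * q.2)) r)
      (PySem.Dict.empty : PySem.Dict (Int × Int) Int)).items
    = (PySem.Set.ofList (pvX cell n rank ×ˢ pvY cell m rank)).map
        (fun k => (k, ((pvX cell n rank ×ˢ pvY cell m rank).count k : Int))) := by
  have hXn : (PySem.Dict.counter (pvX cell n rank)).items.map (fun p => p.1) |>.Nodup :=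
    PySem.Dict.nodup_keys_counter _
  have hYn : (PySem.Dict.counter (pvY cell m rank)).items.map (fun p => p.1) |>.Nodup :=
    PySem.Dict.nodup_keys_counter _
  have hflat : ((PySem.Dict.counter (pvX cell n rank)).items ×ˢ (PySem.Dict.counter (pvY cell m rank)).items).foldl
      (fun r pq => r.insert (pq.1.1, pq.2.1) (pq.1.2 * pq.2.2))
      (PySem.Dict.empty : PySem.Dict (Int × Int) Int)
      = ((PySem.Dict.counter (pvX cell n rank)).items.foldl (fun r p =>
          (PySem.Dict.counter (pvY cell m rank)).items.foldl
            (fun r q => r.insert (p.1, q.1) (p.2 * q.2)) r)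
          (PySem.Dict.empty : PySem.Dict (Int × Int) Int)) := by
    show (List.flatMap _ _).foldl _ _ = _
    rw [List.foldl_flatMap]
    apply PySem.List.foldl_congr_mem
    intro acc p _
    rw [List.foldl_map]
  rw [← hflat]
  have h := PySem.Dict.items_foldl_insert_fresh
    ((PySem.Dict.counter (pvX cell n rank)).items ×ˢ (PySem.Dict.counter (pvY cell m rank)).items)
    (fun pq => (pq.1.1, pq.2.1)) (fun pq => pq.1.2 * pq.2.2)
    (PySem.Dict.empty : PySem.Dict (Int × Int) Int)
    (fun a _ => PySem.Dict.contains_empty _)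
    (by rw [show (fun pq : (Int × Int) × Int × Int => (pq.1.1, pq.2.1)) = (fun pq : (Int × Int) × Int × Int => ((fun p : Int × Int => p.1) pq.1, (fun q : Int × Int => q.1) pq.2)) from rfl,
          pv_map_product]
        exact List.Nodup.product hXn hYn)
  beta_reduce at h
  rw [h]
  rw [show (PySem.Dict.empty : PySem.Dict (Int × Int) Int).items = [] from rfl, List.nil_append]
  rw [PySem.Dict.items_counter, PySem.Dict.items_counter]
  rw [← pv_map_product (fun k : Int => (k, ((pvX cell n rank).count k : Int)))
        (fun k : Int => (k, ((pvY cell m rank).count k : Int)))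
        (PySem.Set.ofList (pvX cell n rank)) (PySem.Set.ofList (pvY cell m rank))]
  rw [List.map_map, pv_ofList_product]
  apply List.map_congr_left
  intro pq _
  simp only [Function.comp]
  rw [pv_count_product]
  push_cast
  rfl

-- block decomposition of the offset list, for 1 ≤ rank
theorem pv_L_split (rank : Int) (hr : 1 ≤ rank) :
    pvL rank = PySem.List.pyRange (-rank) 0 1 ++ 0 :: PySem.List.pyRange 1 (rank+1) 1 := by
  rw [pvL, PySem.List.pyRange_one_append (-rank) 0 (rank+1) (by omega) (by omega),
      PySem.List.pyRange_one_append 0 1 (rank+1) (by omega) (by omega)]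
  have h01 : PySem.List.pyRange 0 1 1 = [0] := by decide
  rw [h01]
  rfl

def pvF (cell : Int × Int) (n i : Int) : Int := PySem.Int.mod (cell.1 + i) n
def pvG (cell : Int × Int) (m j : Int) : Int := PySem.Int.mod (cell.2 + j) m

def pvW1 (cell : Int × Int) (n m rank : Int) : List (Int × Int) :=
  (PySem.List.pyRange (-rank) 0 1).flatMap (fun i => (pvL rank).map (fun j => (pvF cell n i, pvG cell m j)))
    ++ (PySem.List.pyRange (-rank) 0 1).map (fun j => (pvF cell n 0, pvG cell m j))
def pvW2 (cell : Int × Int) (n m rank : Int) : List (Int × Int) :=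
  (PySem.List.pyRange 1 (rank+1) 1).map (fun j => (pvF cell n 0, pvG cell m j))
    ++ (PySem.List.pyRange 1 (rank+1) 1).flatMap (fun i => (pvL rank).map (fun j => (pvF cell n i, pvG cell m j)))

theorem pv_P_split (cell : Int × Int) (n m rank : Int) (hr : 1 ≤ rank) :
    pvX cell n rank ×ˢ pvY cell m rank
      = pvW1 cell n m rank ++ (pvF cell n 0, pvG cell m 0) :: pvW2 cell n m rank := by
  have hprod : pvX cell n rank ×ˢ pvY cell m rank
      = (pvL rank).flatMap (fun i => (pvL rank).map (fun j => (pvF cell n i, pvG cell m j))) := by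
    show (pvX cell n rank).flatMap (fun a => (pvY cell m rank).map (Prod.mk a)) = _
    rw [pvX, List.flatMap_map]
    congr 1
    funext i
    rw [pvY, List.map_map]
    rfl
  rw [hprod]
  nth_rewrite 2 [pv_L_split rank hr]
  rw [List.flatMap_append, List.flatMap_cons]
  have hmid : (pvL rank).map (fun j => (pvF cell n 0, pvG cell m j))
      = (PySem.List.pyRange (-rank) 0 1).map (fun j => (pvF cell n 0, pvG cell m j))
        ++ (pvF cell n 0, pvG cell m 0) :: (PySem.List.pyRange 1 (rank+1) 1).map (fun j => (pvF cell n 0, pvG cell m j)) := by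
    rw [pv_L_split rank hr, List.map_append, List.map_cons]
  rw [hmid, pvW1, pvW2]
  simp only [List.append_assoc, List.cons_append, List.nil_append]

theorem pv_PA_split (cell : Int × Int) (n m rank : Int) (hr : 1 ≤ rank) :
    pvPA cell n m rank = pvW1 cell n m rank ++ pvW2 cell n m rank := by
  have hfull : ∀ i : Int, i ≠ 0 →
      (pvL rank).filter (fun j => decide (i ≠ 0 ∨ j ≠ 0)) = pvL rank := by
    intro i hi
    apply List.filter_eq_self.mpr
    intro j _
    simp [hi]
  have hzero : (pvL rank).filter (fun j => decide ((0:Int) ≠ 0 ∨ j ≠ 0))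
      = PySem.List.pyRange (-rank) 0 1 ++ PySem.List.pyRange 1 (rank+1) 1 := by
    rw [pv_L_split rank hr, List.filter_append, List.filter_cons]
    have h0 : ¬ ((0:Int) ≠ 0 ∨ (0:Int) ≠ 0) := by omega
    rw [if_neg (by simpa using h0)]
    have h1 : (PySem.List.pyRange (-rank) 0 1).filter (fun j => decide ((0:Int) ≠ 0 ∨ j ≠ 0))
        = PySem.List.pyRange (-rank) 0 1 := by
      apply List.filter_eq_self.mpr
      intro j hj
      have := PySem.List.mem_pyRange_one.mp hj
      simp; omega
    have h2 : (PySem.List.pyRange 1 (rank+1) 1).filter (fun j => decide ((0:Int) ≠ 0 ∨ j ≠ 0))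
        = PySem.List.pyRange 1 (rank+1) 1 := by
      apply List.filter_eq_self.mpr
      intro j hj
      have := PySem.List.mem_pyRange_one.mp hj
      simp; omega
    rw [h1, h2]
  show (pvL rank).flatMap (fun i =>
      ((pvL rank).filter (fun j => decide (i ≠ 0 ∨ j ≠ 0))).map
        (fun j => (pvF cell n i, pvG cell m j))) = _
  nth_rewrite 2 [pv_L_split rank hr]
  rw [List.flatMap_append, List.flatMap_cons]
  have hb1 : (PySem.List.pyRange (-rank) 0 1).flatMap (fun i =>
      ((pvL rank).filter (fun j => decide (i ≠ 0 ∨ j ≠ 0))).map (fun j => (pvF cell n i, pvG cell m j)))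
      = (PySem.List.pyRange (-rank) 0 1).flatMap (fun i => (pvL rank).map (fun j => (pvF cell n i, pvG cell m j))) := by
    apply List.flatMap_congr
    intro i hi
    have := PySem.List.mem_pyRange_one.mp hi
    rw [hfull i (by omega)]
  have hb2 : (PySem.List.pyRange 1 (rank+1) 1).flatMap (fun i =>
      ((pvL rank).filter (fun j => decide (i ≠ 0 ∨ j ≠ 0))).map (fun j => (pvF cell n i, pvG cell m j)))
      = (PySem.List.pyRange 1 (rank+1) 1).flatMap (fun i => (pvL rank).map (fun j => (pvF cell n i, pvG cell m j))) := by
    apply List.flatMap_congr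
    intro i hi
    have := PySem.List.mem_pyRange_one.mp hi
    rw [hfull i (by omega)]
  rw [hb1, hb2, hzero, List.map_append, pvW1, pvW2]
  simp only [List.append_assoc]

theorem pv_zero_mem_L (rank : Int) (hr : 1 ≤ rank) : (0:Int) ∈ pvL rank := by
  rw [pvL]
  exact PySem.List.mem_pyRange_one.mpr (by omega)

theorem pv_two_wit (cell : Int × Int) (w rank : Int) (hr : 1 ≤ rank)
    (h2 : 2 ≤ ((pvL rank).map (fun i => PySem.Int.mod (cell.1 + i) w)).count (PySem.Int.mod (cell.1 + 0) w)) :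
    ∃ i', i' ∈ pvL rank ∧ i' ≠ 0 ∧
      PySem.Int.mod (cell.1 + i') w = PySem.Int.mod (cell.1 + 0) w := by
  by_contra hcon
  push_neg at hcon
  have hmono : ((pvL rank).map (fun i => PySem.Int.mod (cell.1 + i) w)).count (PySem.Int.mod (cell.1 + 0) w)
      ≤ (pvL rank).count 0 := by
    rw [List.count_eq_countP, List.countP_map, List.count_eq_countP]
    apply List.countP_mono_left
    intro i hi hb
    simp only [Function.comp, beq_iff_eq] at hb ⊢
    by_contra hne
    exact (hcon i hi hne) hb
  have hle1 : (pvL rank).count 0 ≤ 1 :=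
    (List.nodup_iff_count_le_one.mp (PySem.List.nodup_pyRange_one _ _)) 0
  omega

theorem pv_center_mem_W1 (cell : Int × Int) (n m rank : Int) (hr : 1 ≤ rank)
    (hn : n ≠ 0) (hm : m ≠ 0)
    (h2 : 2 ≤ (pvX cell n rank).count (pvF cell n 0) * (pvY cell m rank).count (pvG cell m 0)) :
    (pvF cell n 0, pvG cell m 0) ∈ pvW1 cell n m rank := by
  have hx1 : 0 < (pvX cell n rank).count (pvF cell n 0) := by
    apply List.count_pos_iff.mpr
    exact List.mem_map.mpr ⟨0, pv_zero_mem_L rank hr, rfl⟩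
  have hy1 : 0 < (pvY cell m rank).count (pvG cell m 0) := by
    apply List.count_pos_iff.mpr
    exact List.mem_map.mpr ⟨0, pv_zero_mem_L rank hr, rfl⟩
  have hcase : 2 ≤ (pvX cell n rank).count (pvF cell n 0) ∨ 2 ≤ (pvY cell m rank).count (pvG cell m 0) := by
    by_contra hcon
    push_neg at hcon
    obtain ⟨ha, hb⟩ := hcon
    interval_cases hx : (pvX cell n rank).count (pvF cell n 0) <;> omega
  rcases hcase with hx2 | hy2
  · obtain ⟨i', hi'mem, hi'ne, hi'eq⟩ := pv_two_wit cell n rank hr hx2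
    have hbnd := PySem.List.mem_pyRange_one.mp hi'mem
    have hdvd : n ∣ i' := by
      have := (pv_mod_eq_iff hn (cell.1 + i') (cell.1 + 0)).mp hi'eq
      simpa using this
    set i0 : Int := -|i'| with hi0
    have hdvd0 : n ∣ i0 := by
      rcases abs_cases i' with ⟨he, _⟩ | ⟨he, _⟩ <;> rw [hi0, he]
      · exact hdvd.neg_right
      · simpa using hdvd
    have hi0mem : i0 ∈ PySem.List.pyRange (-rank) 0 1 := by
      apply PySem.List.mem_pyRange_one.mpr
      have : 0 < |i'| := abs_pos.mpr hi'ne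
      have : |i'| ≤ rank := by
        rcases abs_cases i' with ⟨he, _⟩ | ⟨he, _⟩ <;> omega
      omega
    have hfi0 : pvF cell n i0 = pvF cell n 0 := by
      rw [pvF, pvF]
      apply (pv_mod_eq_iff hn (cell.1 + i0) (cell.1 + 0)).mpr
      simpa using hdvd0
    apply List.mem_append_left
    apply List.mem_flatMap.mpr
    exact ⟨i0, hi0mem, List.mem_map.mpr ⟨0, pv_zero_mem_L rank hr, by rw [hfi0]⟩⟩
  · obtain ⟨j', hj'mem, hj'ne, hj'eq⟩ := pv_two_wit (cell.2, cell.1) m rank hr (by exact hy2)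
    have hbnd := PySem.List.mem_pyRange_one.mp hj'mem
    have hdvd : m ∣ j' := by
      have := (pv_mod_eq_iff hm (cell.2 + j') (cell.2 + 0)).mp hj'eq
      simpa using this
    set j0 : Int := -|j'| with hj0
    have hdvd0 : m ∣ j0 := by
      rcases abs_cases j' with ⟨he, _⟩ | ⟨he, _⟩ <;> rw [hj0, he]
      · exact hdvd.neg_right
      · simpa using hdvd
    have hj0mem : j0 ∈ PySem.List.pyRange (-rank) 0 1 := by
      apply PySem.List.mem_pyRange_one.mpr
      have : 0 < |j'| := abs_pos.mpr hj'ne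
      have : |j'| ≤ rank := by
        rcases abs_cases j' with ⟨he, _⟩ | ⟨he, _⟩ <;> omega
      omega
    have hgj0 : pvG cell m j0 = pvG cell m 0 := by
      rw [pvG, pvG]
      apply (pv_mod_eq_iff hm (cell.2 + j0) (cell.2 + 0)).mpr
      simpa using hdvd0
    apply List.mem_append_right
    exact List.mem_map.mpr ⟨j0, hj0mem, by rw [hgj0]⟩


theorem pv_B_cY (cell : Int × Int) (m rank : Int) :
    ((PySem.List.pyRange (-rank) (rank+1) 1).foldl (fun d j =>
      d.insert (PySem.Int.mod (cell.2 + j) m) (d.getD (PySem.Int.mod (cell.2 + j) m) 0 + 1))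
      (PySem.Dict.empty : PySem.Dict Int Int))
    = PySem.Dict.counter (pvY cell m rank) := by
  rw [pvY, pvL, ← PySem.Dict.foldl_insert_getD_add_one_eq_counter, List.foldl_map]

theorem pv_B_unfold (cell : Int × Int) (n m rank : Int) (h : ¬ rank ≤ 0) :
    get_moore_alt cell n m rank =
      (if (((PySem.Dict.counter (pvX cell n rank)).items.foldl (fun r p =>
        (PySem.Dict.counter (pvY cell m rank)).items.foldl
          (fun r q => r.insert (p.1, q.1) (p.2 * q.2)) r) (PySem.Dict.empty : PySem.Dict (Int × Int) Int)).insert (PySem.Int.mod cell.1 n, PySem.Int.mod cell.2 m) (((PySem.Dict.counter (pvX cell n rank)).items.foldl (fun r p =>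
        (PySem.Dict.counter (pvY cell m rank)).items.foldl
          (fun r q => r.insert (p.1, q.1) (p.2 * q.2)) r) (PySem.Dict.empty : PySem.Dict (Int × Int) Int)).getD (PySem.Int.mod cell.1 n, PySem.Int.mod cell.2 m) 0 - 1)).getD (PySem.Int.mod cell.1 n, PySem.Int.mod cell.2 m) 0 = 0
       then (((PySem.Dict.counter (pvX cell n rank)).items.foldl (fun r p =>
        (PySem.Dict.counter (pvY cell m rank)).items.foldl
          (fun r q => r.insert (p.1, q.1) (p.2 * q.2)) r) (PySem.Dict.empty : PySem.Dict (Int × Int) Int)).insert (PySem.Int.mod cell.1 n, PySem.Int.mod cell.2 m) (((PySem.Dict.counter (pvX cell n rank)).items.foldl (fun r p =>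
        (PySem.Dict.counter (pvY cell m rank)).items.foldl
          (fun r q => r.insert (p.1, q.1) (p.2 * q.2)) r) (PySem.Dict.empty : PySem.Dict (Int × Int) Int)).getD (PySem.Int.mod cell.1 n, PySem.Int.mod cell.2 m) 0 - 1)).erase (PySem.Int.mod cell.1 n, PySem.Int.mod cell.2 m)
       else (((PySem.Dict.counter (pvX cell n rank)).items.foldl (fun r p =>
        (PySem.Dict.counter (pvY cell m rank)).items.foldl
          (fun r q => r.insert (p.1, q.1) (p.2 * q.2)) r) (PySem.Dict.empty : PySem.Dict (Int × Int) Int)).insert (PySem.Int.mod cell.1 n, PySem.Int.mod cell.2 m) (((PySem.Dict.counter (pvX cell n rank)).items.foldl (fun r p =>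
        (PySem.Dict.counter (pvY cell m rank)).items.foldl
          (fun r q => r.insert (p.1, q.1) (p.2 * q.2)) r) (PySem.Dict.empty : PySem.Dict (Int × Int) Int)).getD (PySem.Int.mod cell.1 n, PySem.Int.mod cell.2 m) 0 - 1))).items.map (fun p => (p.1.1, p.1.2, p.2)) := by
  simp only [get_moore_alt, if_neg h]
  rw [pv_B_cX, pv_B_cY]

theorem pv_main (cell : Int × Int) (n m rank : Int)
    (hpre : rank ≤ 0 ∨ (n ≠ 0 ∧ m ≠ 0)) :
    get_moore cell n m rank = get_moore_alt cell n m rank := by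
  by_cases hr0 : rank ≤ 0
  · rw [get_moore_alt, if_pos hr0, pv_A_norm]
    have hPA : pvPA cell n m rank = [] := by
      rcases lt_or_eq_of_le hr0 with hlt | heq
      · have hL : pvL rank = [] := by
          rw [pvL]; exact PySem.List.pyRange_one_eq_nil (by omega)
        rw [pvPA]
        rw [show (pvL rank).flatMap _ = ([] : List Int).flatMap
          (fun i => ((pvL rank).filter (fun j => decide (i ≠ 0 ∨ j ≠ 0))).map
            (fun j => (PySem.Int.mod (cell.1 + i) n, PySem.Int.mod (cell.2 + j) m))) from by rw [hL]]
        rfl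
      · subst heq
        have hL : pvL 0 = [0] := by decide
        rw [pvPA, hL]
        simp
    rw [hPA]
    rfl
  · have hr : 1 ≤ rank := by omega
    have hn : n ≠ 0 := by
      cases hpre with
      | inl h => exact absurd h hr0
      | inr h => exact h.1
    have hm : m ≠ 0 := by
      cases hpre with
      | inl h => exact absurd h hr0
      | inr h => exact h.2
    rw [pv_A_norm, pv_B_unfold cell n m rank hr0]
    -- abbreviations
    set X := pvX cell n rank with hX
    set Y := pvY cell m rank with hY
    set c : Int × Int := (pvF cell n 0, pvG cell m 0) with hc
    have hcB : (PySem.Int.mod cell.1 n, PySem.Int.mod cell.2 m) = c := by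
      rw [hc, pvF, pvG, add_zero, add_zero]
    set cnt : Nat := (X ×ˢ Y).count c with hcnt
    set D : PySem.Dict (Int × Int) Int :=
      (PySem.Dict.counter X).items.foldl (fun r p =>
        (PySem.Dict.counter Y).items.foldl
          (fun r q => r.insert (p.1, q.1) (p.2 * q.2)) r) PySem.Dict.empty with hD
    have hDitems : D.items = (PySem.Set.ofList (X ×ˢ Y)).map (fun k => (k, ((X ×ˢ Y).count k : Int))) := by
      rw [hD]
      rw [pv_B_res cell n m rank]
    have hkeys : D.keys = PySem.Set.ofList (X ×ˢ Y) := by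
      show D.items.map (fun p => p.1) = _
      rw [hDitems, List.map_map]
      rw [show ((fun p : (Int × Int) × Int => p.1) ∘ (fun k : Int × Int => (k, ((X ×ˢ Y).count k : Int)))) = id from rfl, List.map_id]
    have hkeysnd : D.keys.Nodup := by
      rw [hkeys]; exact PySem.Set.nodup_ofList _
    have hmemc : c ∈ PySem.Set.ofList (X ×ˢ Y) := by
      apply (PySem.Set.mem_ofList _ _).mpr
      apply List.mem_product.mpr
      constructor
      · exact List.mem_map.mpr ⟨0, pv_zero_mem_L rank hr, rfl⟩
      · exact List.mem_map.mpr ⟨0, pv_zero_mem_L rank hr, rfl⟩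
    have hcnt1 : 1 ≤ cnt := by
      rw [hcnt]
      apply List.count_pos_iff.mpr
      exact (PySem.Set.mem_ofList _ _).mp hmemc
    have hgetD : D.getD c 0 = (cnt : Int) := by
      apply PySem.Dict.getD_of_mem_items D _ hkeysnd
      rw [hDitems]
      exact List.mem_map.mpr ⟨c, hmemc, rfl⟩
    have hcontains : D.contains c = true := by
      apply (PySem.Dict.contains_iff_mem_keys _ _).mpr
      rw [hkeys]; exact hmemc
    rw [hcB, hgetD]
    set D1 := D.insert c ((cnt : Int) - 1) with hD1
    have hD1getD : D1.getD c 0 = (cnt : Int) - 1 := PySem.Dict.getD_insert_self _ _ _ _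
    have hD1items : D1.items = D.items.map (fun p => if p.1 == c then (c, (cnt : Int) - 1) else p) :=
      PySem.Dict.items_insert_of_contains D _ hcontains
    rw [hD1getD]
    -- split decompositions
    have hsplitP := pv_P_split cell n m rank hr
    have hsplitPA := pv_PA_split cell n m rank hr
    rw [← hX, ← hY] at hsplitP
    rw [← hc] at hsplitP
    by_cases hone : cnt = 1
    · -- centre occurs exactly once: it is deleted on both sides
      rw [if_pos (by rw [hone]; norm_num)]
      have hW1 : c ∉ pvW1 cell n m rank := by
        apply List.count_eq_zero.mp
        have := hcnt
        rw [hsplitP] at this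
        rw [List.count_append, List.count_cons_self] at this
        omega
      have hW2 : c ∉ pvW2 cell n m rank := by
        apply List.count_eq_zero.mp
        have := hcnt
        rw [hsplitP] at this
        rw [List.count_append, List.count_cons_self] at this
        omega
      have hset : PySem.Set.ofList (pvPA cell n m rank)
          = (PySem.Set.ofList (X ×ˢ Y)).filter (fun k => !(k == c)) := by
        rw [hsplitPA, hsplitP]
        exact pv_ofList_mid_not_mem _ _ _ hW1 hW2
      have hcount : ∀ k : Int × Int, k ≠ c →
          (pvPA cell n m rank).count k = (X ×ˢ Y).count k := by
        intro k hk
        rw [hsplitPA, hsplitP, List.count_append, List.count_append,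
            List.count_cons_of_ne (by simpa using Ne.symm hk)]
      -- B side: erase
      have herase : (D1.erase c).items = D1.items.filter (fun p => !(p.1 == c)) := rfl
      rw [herase, hD1items, hDitems, hset]
      rw [List.filter_map]
      have hpred : ((fun p : (Int × Int) × Int => !(p.1 == c)) ∘
          (fun p : (Int × Int) × Int => if p.1 == c then (c, (cnt : Int) - 1) else p))
          = fun p : (Int × Int) × Int => !(p.1 == c) := by
        funext p
        by_cases hp : p.1 = c
        · simp [hp]
        · simp [hp]
      rw [hpred, List.filter_map]
      congr 1
      rw [List.map_map]
      apply List.map_congr_left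
      intro k hk
      have hkne : k ≠ c := by
        have := List.of_mem_filter hk
        simpa using this
      have hkc : (k == c) = false := by simpa using hkne
      simp only [Function.comp, hkc, Bool.false_eq_true, if_false]
      rw [hcount k hkne]
    · -- centre occurs at least twice: value is decremented in place
      have htwo : 2 ≤ cnt := by omega
      rw [if_neg (by
        intro hzero
        have : (cnt : Int) = 1 := by omega
        have : cnt = 1 := by exact_mod_cast this
        exact hone this)]
      have hcmem1 : c ∈ pvW1 cell n m rank := by
        apply pv_center_mem_W1 cell n m rank hr hn hm
        rw [← pv_count_product, ← hX, ← hY, ← hc, ← hcnt]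
        exact htwo
      have hset : PySem.Set.ofList (pvPA cell n m rank) = PySem.Set.ofList (X ×ˢ Y) := by
        rw [hsplitPA, hsplitP]
        exact pv_ofList_mid_mem _ _ _ hcmem1
      have hcountc : (pvPA cell n m rank).count c = cnt - 1 := by
        have := hcnt
        rw [hsplitP] at this
        rw [List.count_append, List.count_cons_self] at this
        rw [hsplitPA, List.count_append]
        omega
      have hcount : ∀ k : Int × Int, k ≠ c →
          (pvPA cell n m rank).count k = (X ×ˢ Y).count k := by
        intro k hk
        rw [hsplitPA, hsplitP, List.count_append, List.count_append,
            List.count_cons_of_ne (by simpa using Ne.symm hk)]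
      rw [hD1items, hDitems, hset]
      simp only [List.map_map]
      apply List.map_congr_left
      intro k hk
      by_cases hkc : k = c
      · subst hkc
        simp only [Function.comp, beq_self_eq_true, if_true]
        rw [hcountc]
        have : ((cnt - 1 : Nat) : Int) = (cnt : Int) - 1 := by omega
        rw [this]
      · have hb : (k == c) = false := by simpa using hkc
        simp only [Function.comp, hb, Bool.false_eq_true, if_false]
        rw [hcount k hkc]

-- ===== VERDICT (by name: the statement is the Claim_ definition above) =====
theorem get_moore_spec : Claim_equal_get_moore := by
  intro cell n m rank _ hpre
  exact pv_main cell n m rank hpre
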